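-- pv_equiv track=rewrite | github.com/Jinjas/thesis-project | src/python/cocktail/add_ingredient.py | add_ingredient_lines
-- ===== SOURCE A (Python) =====
-- def add_ingredient_lines(onto_text: str, ingredient_name: str, ingredient_type: str):
--     lines = onto_text.splitlines()
--     result = []
--     conceptsHolder = []
--
--     in_zone1 = False
--     in_zone2 = False
--     cocktail_name = lines[0].strip().split()[1]
--
--     for line in lines:
--         stripped = line.lstrip()
--
--         if stripped.startswith("concepts"):
--             in_zone1 = True
--             result.append(line)
--             continue
--
--         if in_zone1 and stripped.startswith("}"):
--             in_zone1 = False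
--             if not result[-2].rstrip().endswith(",") and not result[-2].lstrip().startswith("concepts"):
--                 result[-2] = result[-2] + ","
--             result.extend(conceptsHolder)
--             result.append(line)
--             conceptsHolder = []
--             continue
--         if in_zone1:
--             if ingredient_type not in stripped:
--                 if stripped.startswith("%"):
--                     conceptsHolder.append(line)
--                     continue
--                 else:
--                     result.append(line)
--                     continue
--             else:
--                 if stripped.startswith("%"):
--                     idx = line.index("%")
--                     line = line[:idx] + line[idx + 1 :]
--                 result.append(line)
--                 continue
--         if stripped.startswith("individuals"):
--             result.append(line)
--             result.append(f"    {ingredient_name},")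
--             continue
--         if stripped.startswith("triples"):
--             in_zone2 = True
--             result.append(line)
--             result.append(f"    {ingredient_name} = iof => {ingredient_type};")
--             continue
--         if in_zone2 and stripped.startswith("}"):
--             in_zone2 = False
--             result.append(f"    {ingredient_name} = pof => {cocktail_name}Cocktail;")
--             result.append(line)
--             continue
--         result.append(line)
--
--
--
--     return cocktail_name, "\n".join(result)
-- ===== SOURCE B (Python) =====
-- def add_ingredient_lines(onto_text: str, ingredient_name: str, ingredient_type: str):
--     lines = onto_text.splitlines()
--     cocktail_name = lines[0].strip().split()[1]
--
--     def concepts_body(ls, kept, held):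
--         # consume the concepts-zone interior up to (not including) its closing '}'
--         for i, line in enumerate(ls):
--             s = line.lstrip()
--             if s.startswith("}"):
--                 return kept, held, ls[i:]
--             if ingredient_type in s and not s.startswith("concepts"):
--                 if s.startswith("%"):
--                     j = line.index("%")
--                     line = line[:j] + line[j + 1:]
--                 kept.append(line)
--             elif s.startswith("%"):
--                 held.append(line)
--             else:
--                 kept.append(line)
--         return kept, held, []
--
--     out = []
--     in2 = False
--     i = 0
--     n = len(lines)
--     while i < n:
--         line = lines[i]
--         s = line.lstrip()
--         if s.startswith("concepts"):
--             kept, held, rest = concepts_body(lines[i + 1:], [], [])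
--             out.append(line)
--             out.extend(kept)
--             i = n - len(rest)
--             if rest:
--                 if not out[-2].rstrip().endswith(",") and not out[-2].lstrip().startswith("concepts"):
--                     out[-2] += ","
--                 out.extend(held)
--                 out.append(rest[0])
--                 i += 1
--         elif s.startswith("individuals"):
--             out.extend([line, f"    {ingredient_name},"])
--             i += 1
--         elif s.startswith("triples"):
--             in2 = True
--             out.extend([line, f"    {ingredient_name} = iof => {ingredient_type};"])
--             i += 1
--         elif in2 and s.startswith("}"):
--             in2 = False
--             out.extend([f"    {ingredient_name} = pof => {cocktail_name}Cocktail;", line])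
--             i += 1
--         else:
--             out.append(line)
--             i += 1
--     return cocktail_name, "\n".join(out)
-- ===== Notes on version B (the rewrite author's own statement) =====
-- stated objective: alternative
-- what changed: A's single flag-driven state machine (in_zone1/in_zone2 booleans threading a conceptsHolder across iterations) is replaced by a block decomposition: a helper consumes the whole concepts-zone interior at once, partitioning it into kept and held lines, and the main scan splices kept/comma-patch/held at the closing brace and resumes after it.
import Mathlib
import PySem

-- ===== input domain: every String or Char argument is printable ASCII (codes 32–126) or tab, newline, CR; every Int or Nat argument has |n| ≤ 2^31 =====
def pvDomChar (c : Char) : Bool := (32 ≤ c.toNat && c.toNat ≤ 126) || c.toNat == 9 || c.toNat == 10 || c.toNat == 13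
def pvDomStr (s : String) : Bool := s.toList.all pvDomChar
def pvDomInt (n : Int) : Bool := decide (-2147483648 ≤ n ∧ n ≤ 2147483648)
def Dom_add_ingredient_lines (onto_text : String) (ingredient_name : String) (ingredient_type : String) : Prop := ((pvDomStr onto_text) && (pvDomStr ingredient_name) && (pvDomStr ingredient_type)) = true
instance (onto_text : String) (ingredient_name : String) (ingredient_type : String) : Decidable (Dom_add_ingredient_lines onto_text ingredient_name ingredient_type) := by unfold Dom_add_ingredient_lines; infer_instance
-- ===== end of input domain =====

-- B replaces A's single flag-driven loop (in_zone1/in_zone2 state machine threading a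
-- conceptsHolder) by a different decomposition: a helper that consumes the whole concepts-zone
-- interior at once, partitioning it into kept/held lines, with the main scan splicing the
-- result and resuming after the closing brace (objective: alternative decomposition, not speed).

-- ===== PORT A =====
-- result[-2] read/write: Python raises IndexError when len(result) < 2 (excluded by Pre_);
-- ported total via pyGetD/pySetD (exact wherever Python returns).
def pvFixComma (res : List String) : List String :=
  let prev := PySem.List.pyGetD res (-2) ""
  if !(PySem.Str.endswith (PySem.Str.rstrip prev) ",") &&
     !(PySem.Str.startswith (PySem.Str.lstrip prev) "concepts") then
    PySem.List.pySetD res (-2) (prev ++ ",")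
  else res

-- line[:idx] + line[idx+1:] with idx = line.index("%"); '%' is present wherever A reaches this
-- (stripped.startswith("%")), so Str.find equals Python's .index there.
def pvDropPct (line : String) : String :=
  let idx := PySem.Str.find line "%"
  PySem.Str.slice line none (some idx) ++ PySem.Str.slice line (some (idx + 1)) none

def pvLoopA (name typ cname : String) : List String → Bool → Bool → List String → List String → List String
  | [], _, _, res, _ => res
  | line :: rest, z1, z2, res, hold =>
    let s := PySem.Str.lstrip line
    if PySem.Str.startswith s "concepts" then
      pvLoopA name typ cname rest true z2 (res ++ [line]) hold
    else if z1 && PySem.Str.startswith s "}" then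
      pvLoopA name typ cname rest false z2 (pvFixComma res ++ hold ++ [line]) []
    else if z1 then
      if !(PySem.Str.isIn typ s) then
        if PySem.Str.startswith s "%" then
          pvLoopA name typ cname rest z1 z2 res (hold ++ [line])
        else
          pvLoopA name typ cname rest z1 z2 (res ++ [line]) hold
      else
        let line' := if PySem.Str.startswith s "%" then pvDropPct line else line
        pvLoopA name typ cname rest z1 z2 (res ++ [line']) hold
    else if PySem.Str.startswith s "individuals" then
      pvLoopA name typ cname rest z1 z2 (res ++ [line, "    " ++ name ++ ","]) hold
    else if PySem.Str.startswith s "triples" then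
      pvLoopA name typ cname rest z1 true (res ++ [line, "    " ++ name ++ " = iof => " ++ typ ++ ";"]) hold
    else if z2 && PySem.Str.startswith s "}" then
      pvLoopA name typ cname rest z1 false (res ++ ["    " ++ name ++ " = pof => " ++ cname ++ "Cocktail;", line]) hold
    else
      pvLoopA name typ cname rest z1 z2 (res ++ [line]) hold

def add_ingredient_lines (onto_text : String) (ingredient_name : String) (ingredient_type : String) : String × String :=
  let lines := PySem.Str.splitlines onto_text
  -- lines[0].strip().split()[1]: both indexings raise on short input (excluded by Pre_); ported via pyGetD
  let cocktail_name := PySem.List.pyGetD (PySem.Str.split₀ (PySem.Str.strip (PySem.List.pyGetD lines 0 ""))) 1 ""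
  (cocktail_name, PySem.Str.join "\n" (pvLoopA ingredient_name ingredient_type cocktail_name lines false false [] []))

-- ===== PORT B =====
def pvFixCommaAlt (out : List String) : List String :=
  let prev := PySem.List.pyGetD out (-2) ""
  if !(PySem.Str.endswith (PySem.Str.rstrip prev) ",") &&
     !(PySem.Str.startswith (PySem.Str.lstrip prev) "concepts") then
    PySem.List.pySetD out (-2) (prev ++ ",")
  else out

def pvDropPctAlt (line : String) : String :=
  let j := PySem.Str.find line "%"
  PySem.Str.slice line none (some j) ++ PySem.Str.slice line (some (j + 1)) none

-- concepts_body: consume the zone interior up to (not including) the closing '}',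
-- accumulating kept and held lines; returns (kept, held, remaining lines from the '}').
def pvConceptsBody (typ : String) : List String → List String → List String → List String × List String × List String
  | [], kept, held => (kept, held, [])
  | line :: rest, kept, held =>
    let s := PySem.Str.lstrip line
    if PySem.Str.startswith s "}" then (kept, held, line :: rest)
    else if PySem.Str.isIn typ s && !(PySem.Str.startswith s "concepts") then
      let line' := if PySem.Str.startswith s "%" then pvDropPctAlt line else line
      pvConceptsBody typ rest (kept ++ [line']) held
    else if PySem.Str.startswith s "%" then
      pvConceptsBody typ rest kept (held ++ [line])
    else
      pvConceptsBody typ rest (kept ++ [line]) held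

theorem pvConceptsBody_rest_le (typ : String) (ls kept held : List String) :
    (pvConceptsBody typ ls kept held).2.2.length ≤ ls.length := by
  induction ls generalizing kept held with
  | nil => simp [pvConceptsBody]
  | cons line rest ih =>
    simp only [pvConceptsBody]
    split_ifs <;> simp <;> exact le_trans (ih _ _) (by omega)

def pvLoopB (name typ cname : String) (ls : List String) (in2 : Bool) (out : List String) : List String :=
  match ls with
  | [] => out
  | line :: rest =>
    let s := PySem.Str.lstrip line
    if PySem.Str.startswith s "concepts" then
      match h : pvConceptsBody typ rest [] [] with
      | (kept, held, []) => out ++ [line] ++ kept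
      | (kept, held, brace :: rest') =>
        pvLoopB name typ cname rest' in2 (pvFixCommaAlt (out ++ [line] ++ kept) ++ held ++ [brace])
    else if PySem.Str.startswith s "individuals" then
      pvLoopB name typ cname rest in2 (out ++ [line, "    " ++ name ++ ","])
    else if PySem.Str.startswith s "triples" then
      pvLoopB name typ cname rest true (out ++ [line, "    " ++ name ++ " = iof => " ++ typ ++ ";"])
    else if in2 && PySem.Str.startswith s "}" then
      pvLoopB name typ cname rest false (out ++ ["    " ++ name ++ " = pof => " ++ cname ++ "Cocktail;", line])
    else
      pvLoopB name typ cname rest in2 (out ++ [line])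
termination_by ls.length
decreasing_by
  · have := pvConceptsBody_rest_le typ rest [] []
    rw [h] at this
    simp at this ⊢
    omega
  all_goals simp

def add_ingredient_lines_alt (onto_text : String) (ingredient_name : String) (ingredient_type : String) : String × String :=
  let lines := PySem.Str.splitlines onto_text
  let cocktail_name := PySem.List.pyGetD (PySem.Str.split₀ (PySem.Str.strip (PySem.List.pyGetD lines 0 ""))) 1 ""
  (cocktail_name, PySem.Str.join "\n" (pvLoopB ingredient_name ingredient_type cocktail_name lines false []))

-- ===== PRECONDITION & SPEC =====
-- Pre_ is exactly where Python A returns: it excludes (a) inputs whose first line has fewer than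
-- two whitespace-separated tokens (IndexError on lines[0].strip().split()[1], incl. empty text),
-- and (b) inputs whose first line opens the concepts zone and whose closing '}' is preceded only
-- by withheld '%'-comment lines, so result[-2] is an IndexError (len(result) < 2 there).
def Pre_add_ingredient_lines (onto_text : String) (ingredient_name : String) (ingredient_type : String) : Prop :=
  let lines := PySem.Str.splitlines onto_text
  lines ≠ [] ∧
  2 ≤ (PySem.Str.split₀ (PySem.Str.strip (lines.headD ""))).length ∧
  ¬ (PySem.Str.startswith (PySem.Str.lstrip (lines.headD "")) "concepts" = true ∧
     ∃ j, j < lines.length ∧ 1 ≤ j ∧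
       PySem.Str.startswith (PySem.Str.lstrip (lines.getD j "")) "}" = true ∧
       ∀ k, k < j → 1 ≤ k →
         PySem.Str.startswith (PySem.Str.lstrip (lines.getD k "")) "%" = true ∧
         PySem.Str.isIn ingredient_type (PySem.Str.lstrip (lines.getD k "")) = false)
instance (onto_text : String) (ingredient_name : String) (ingredient_type : String) : Decidable (Pre_add_ingredient_lines onto_text ingredient_name ingredient_type) := by unfold Pre_add_ingredient_lines; infer_instance

def pvWitness_add_ingredient_lines : String × String × String :=
  ("cocktail Mojito {\nconcepts\n  rum,\n  % gin\n}\nindividuals\ntriples\n}", "lime", "rum")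

def Spec_add_ingredient_lines (onto_text : String) (ingredient_name : String) (ingredient_type : String) (out : String × String) : Prop := out = add_ingredient_lines_alt onto_text ingredient_name ingredient_type
instance (onto_text : String) (ingredient_name : String) (ingredient_type : String) (out : String × String) : Decidable (Spec_add_ingredient_lines onto_text ingredient_name ingredient_type out) := by unfold Spec_add_ingredient_lines; infer_instance

-- ===== CLAIM (what is proved, stated in full; the proofs are below) =====
def Claim_equal_add_ingredient_lines : Prop := ∀ (onto_text : String) (ingredient_name : String) (ingredient_type : String), Dom_add_ingredient_lines onto_text ingredient_name ingredient_type → Pre_add_ingredient_lines onto_text ingredient_name ingredient_type → Spec_add_ingredient_lines onto_text ingredient_name ingredient_type (add_ingredient_lines onto_text ingredient_name ingredient_type)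

-- ===== LEMMAS AND PROOFS =====

theorem pvStartswith_excl (s p q : String) (c d : Char)
    (hp : p.toList.head? = some c) (hq : q.toList.head? = some d) (hcd : c ≠ d)
    (h : PySem.Str.startswith s p = true) : PySem.Str.startswith s q = false := by
  rw [PySem.Str.startswith_eq] at h ⊢
  rw [PySem.Chars.startswith_iff] at h
  rw [Bool.eq_false_iff, Ne, PySem.Chars.startswith_iff]
  intro hq'
  obtain ⟨t1, ht1⟩ := h
  obtain ⟨t2, ht2⟩ := hq'
  apply hcd
  have h1 : s.toList.head? = some c := by
    cases hpl : p.toList with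
    | nil => simp [hpl] at hp
    | cons a l => rw [hpl] at ht1; simp [hpl] at hp; simp [← ht1, hp]
  have h2 : s.toList.head? = some d := by
    cases hql : q.toList with
    | nil => simp [hql] at hq
    | cons a l => rw [hql] at ht2; simp [hql] at hq; simp [← ht2, hq]
  rw [h1] at h2; exact (Option.some_inj.mp h2)

theorem pvFixCommaAlt_eq (res : List String) : pvFixCommaAlt res = pvFixComma res := rfl

theorem pvDropPctAlt_eq (line : String) : pvDropPctAlt line = pvDropPct line := rfl

theorem pvWitness_ok :
    Dom_add_ingredient_lines pvWitness_add_ingredient_lines.1 pvWitness_add_ingredient_lines.2.1 pvWitness_add_ingredient_lines.2.2 ∧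
    Pre_add_ingredient_lines pvWitness_add_ingredient_lines.1 pvWitness_add_ingredient_lines.2.1 pvWitness_add_ingredient_lines.2.2 := by
  decide

-- A's run through the concepts zone equals B's pvConceptsBody followed by the close/splice.
theorem pvLoopA_zone1 (name typ cname : String) (ls : List String) :
    ∀ (kept held : List String) (z2 : Bool) (res hold : List String),
    pvLoopA name typ cname ls true z2 (res ++ kept) (hold ++ held) =
      (match pvConceptsBody typ ls kept held with
       | (k, _, []) => res ++ k
       | (k, h, brace :: rest') =>
         pvLoopA name typ cname rest' false z2 (pvFixComma (res ++ k) ++ hold ++ h ++ [brace]) []) := by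
  induction ls with
  | nil => intro kept held z2 res hold; simp [pvLoopA, pvConceptsBody]
  | cons line rest ih =>
    intro kept held z2 res hold
    by_cases hc : PySem.Str.startswith (PySem.Str.lstrip line) "concepts" = true
    · have hb : PySem.Str.startswith (PySem.Str.lstrip line) "}" = false :=
        pvStartswith_excl _ _ _ 'c' '}' rfl rfl (by decide) hc
      have hp : PySem.Str.startswith (PySem.Str.lstrip line) "%" = false :=
        pvStartswith_excl _ _ _ 'c' '%' rfl rfl (by decide) hc
      simp only [pvLoopA, pvConceptsBody, hc, hb, hp, if_true, if_false, Bool.false_and,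
        Bool.and_false, Bool.not_true, Bool.and_true, ite_false, ite_true]
      rw [show (res ++ kept) ++ [line] = res ++ (kept ++ [line]) from by simp]
      exact ih (kept ++ [line]) held z2 res hold
    · by_cases hb : PySem.Str.startswith (PySem.Str.lstrip line) "}" = true
      · simp only [pvLoopA, pvConceptsBody, hc, hb, if_true, if_false, Bool.true_and,
          Bool.and_true, ite_true, ite_false]
        simp [List.append_assoc]
      · by_cases hin : PySem.Str.isIn typ (PySem.Str.lstrip line) = true
        · simp only [pvLoopA, pvConceptsBody, hc, hb, hin, Bool.true_and, Bool.not_false,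
            Bool.and_true, if_true, if_false, ite_true, ite_false, Bool.not_eq_true']
          rw [pvDropPctAlt_eq]
          rw [show (res ++ kept) ++ [if PySem.Str.startswith (PySem.Str.lstrip line) "%" = true then pvDropPct line else line]
              = res ++ (kept ++ [if PySem.Str.startswith (PySem.Str.lstrip line) "%" = true then pvDropPct line else line]) from by simp]
          exact ih _ held z2 res hold
        · by_cases hp : PySem.Str.startswith (PySem.Str.lstrip line) "%" = true
          · simp only [pvLoopA, pvConceptsBody, hc, hb, hin, hp, Bool.false_and, Bool.not_true,
              if_true, if_false, ite_true, ite_false]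
            rw [show (hold ++ held) ++ [line] = hold ++ (held ++ [line]) from by simp]
            exact ih kept (held ++ [line]) z2 res hold
          · simp only [pvLoopA, pvConceptsBody, hc, hb, hin, hp, Bool.false_and, if_true,
              if_false, ite_true, ite_false]
            rw [show (res ++ kept) ++ [line] = res ++ (kept ++ [line]) from by simp]
            exact ih (kept ++ [line]) held z2 res hold

theorem pvLoopB_eq_A (name typ cname : String) (ls : List String) (in2 : Bool) (out : List String) :
    pvLoopB name typ cname ls in2 out = pvLoopA name typ cname ls false in2 out [] := by
  induction ls, in2, out using pvLoopB.induct name typ cname with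
  | case1 in2 out => simp [pvLoopB, pvLoopA]
  | case2 in2 out line rest s hc kept held h =>
    have hc2 : PySem.Str.startswith (PySem.Str.lstrip line) "concepts" = true := hc
    rw [pvLoopB, pvLoopA]
    have hz := pvLoopA_zone1 name typ cname rest [] [] in2 (out ++ [line]) []
    simp only [List.append_nil, h] at hz
    simp only [hc2, if_true, hz]
    split
    · next k2 h2 heq => rw [h] at heq; cases heq; rfl
    · next k2 h2 b2 r2 heq => rw [h] at heq; simp [Prod.ext_iff] at heq
  | case3 in2 out line rest s hc kept held brace rest' h ih =>
    have hc2 : PySem.Str.startswith (PySem.Str.lstrip line) "concepts" = true := hc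
    rw [pvLoopB, pvLoopA]
    have hz := pvLoopA_zone1 name typ cname rest [] [] in2 (out ++ [line]) []
    simp only [List.append_nil, h] at hz
    simp only [hc2, if_true, hz]
    split
    · next k2 h2 heq => rw [h] at heq; simp [Prod.ext_iff] at heq
    · next k2 h2 b2 r2 heq =>
        rw [h] at heq; cases heq
        rw [pvFixCommaAlt_eq]
        exact ih
  | case4 in2 out line rest s hc hi ih =>
    have hc2 : ¬ PySem.Str.startswith (PySem.Str.lstrip line) "concepts" = true := hc
    have hi2 : PySem.Str.startswith (PySem.Str.lstrip line) "individuals" = true := hi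
    rw [Bool.not_eq_true] at hc2
    rw [pvLoopB, pvLoopA]
    simp only [hc2, hi2, Bool.false_and, Bool.false_eq_true, if_true, if_false, ite_false, ite_true]
    exact ih
  | case5 in2 out line rest s hc hi ht ih =>
    have hc2 : ¬ PySem.Str.startswith (PySem.Str.lstrip line) "concepts" = true := hc
    have hi2 : ¬ PySem.Str.startswith (PySem.Str.lstrip line) "individuals" = true := hi
    have ht2 : PySem.Str.startswith (PySem.Str.lstrip line) "triples" = true := ht
    rw [Bool.not_eq_true] at hc2 hi2
    rw [pvLoopB, pvLoopA]
    simp only [hc2, hi2, ht2, Bool.false_and, Bool.false_eq_true, if_true, if_false, ite_false, ite_true]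
    exact ih
  | case6 in2 out line rest s hc hi ht hz ih =>
    have hc2 : ¬ PySem.Str.startswith (PySem.Str.lstrip line) "concepts" = true := hc
    have hi2 : ¬ PySem.Str.startswith (PySem.Str.lstrip line) "individuals" = true := hi
    have ht2 : ¬ PySem.Str.startswith (PySem.Str.lstrip line) "triples" = true := ht
    have hz2 : (in2 && PySem.Str.startswith (PySem.Str.lstrip line) "}") = true := hz
    rw [Bool.not_eq_true] at hc2 hi2 ht2
    rw [pvLoopB, pvLoopA]
    simp only [hc2, hi2, ht2, hz2, Bool.false_and, Bool.false_eq_true, if_true, if_false, ite_false, ite_true]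
    exact ih
  | case7 in2 out line rest s hc hi ht hz ih =>
    have hc2 : ¬ PySem.Str.startswith (PySem.Str.lstrip line) "concepts" = true := hc
    have hi2 : ¬ PySem.Str.startswith (PySem.Str.lstrip line) "individuals" = true := hi
    have ht2 : ¬ PySem.Str.startswith (PySem.Str.lstrip line) "triples" = true := ht
    have hz2 : ¬ (in2 && PySem.Str.startswith (PySem.Str.lstrip line) "}") = true := hz
    rw [Bool.not_eq_true] at hc2 hi2 ht2 hz2
    rw [pvLoopB, pvLoopA]
    simp only [hc2, hi2, ht2, hz2, Bool.false_and, Bool.false_eq_true, if_true, if_false, ite_false, ite_true]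
    exact ih

-- ===== VERDICT (by name: the statement is the Claim_ definition above) =====
theorem add_ingredient_lines_spec : Claim_equal_add_ingredient_lines := by
  intro onto name typ _ _
  unfold Spec_add_ingredient_lines add_ingredient_lines add_ingredient_lines_alt
  simp only [pvLoopB_eq_A]
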